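-- pv_equiv track=rewrite | github.com/akashdeshmukh7566/DNA_DATA_ANALYSIS | DNA_DATA_ANALYSIS/Sequence_Analyser/utils/mRNA_helper.py | codon_lists
-- ===== SOURCE A (Python) =====
-- def codon_lists(mRNA):                               #5.function for list of codon
--     stop_codon = ["UAA", "UAG", "UGA"]
--     codon = []
--     i = 0
--     for i in range(i,len(mRNA),3):
--         code = mRNA[i:i+3]
--         if code in stop_codon:
--             break
--         else:
--             codon.append(code)
--     return codon
-- ===== SOURCE B (Python) =====
-- def codon_lists(mRNA):
--     stop_codon = ["UAA", "UAG", "UGA"]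
--     codon = []
--     buf = ""
--     for ch in mRNA:
--         buf += ch
--         if len(buf) == 3:
--             if buf in stop_codon:
--                 return codon
--             codon.append(buf)
--             buf = ""
--     if buf:
--         codon.append(buf)  # trailing partial codon (length 1-2, never a stop codon)
--     return codon
-- ===== Notes on version B (the rewrite author's own statement) =====
-- stated objective: alternative
-- what changed: A iterates over indices range(0,len,3) and slices mRNA[i:i+3]; B does no indexing or slicing at all: it streams the string character by character, accumulating a 3-character buffer and emitting/stop-checking it each time it fills, flushing a trailing partial buffer at the end.
import Mathlib
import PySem

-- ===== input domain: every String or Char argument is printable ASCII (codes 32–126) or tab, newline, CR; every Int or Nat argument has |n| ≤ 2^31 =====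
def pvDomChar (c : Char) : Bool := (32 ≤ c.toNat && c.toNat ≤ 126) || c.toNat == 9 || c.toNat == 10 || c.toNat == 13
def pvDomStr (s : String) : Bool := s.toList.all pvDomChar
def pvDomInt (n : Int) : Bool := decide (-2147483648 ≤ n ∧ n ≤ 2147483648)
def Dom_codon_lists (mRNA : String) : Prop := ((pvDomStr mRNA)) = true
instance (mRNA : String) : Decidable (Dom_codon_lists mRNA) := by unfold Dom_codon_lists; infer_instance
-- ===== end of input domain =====

-- B streams the string character by character through a 3-char buffer instead of
-- A's index loop over range(0,len,3) with slicing; same output, alternative algorithm.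

-- ===== PORT A =====
-- the for-loop with break: recursion over the index list, break returns what was appended so far
def codonLoopA (mRNA : String) : List Int → List String
  | [] => []
  | i :: rest =>
    let code := PySem.Str.slice mRNA (some i) (some (i + 3))
    if ["UAA", "UAG", "UGA"].contains code then []
    else code :: codonLoopA mRNA rest

def codon_lists (mRNA : String) : List String :=
  codonLoopA mRNA (PySem.List.pyRange 0 (PySem.Str.len mRNA) 3)

-- ===== PORT B =====
-- the for-loop over characters: state = (codon accumulator, buffer); early return on a stop codon
def codonGoB : List Char → List String → List Char → List String
  | [], codon, buf => if buf.isEmpty then codon else codon ++ [String.ofList buf]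
  | ch :: rest, codon, buf =>
    let buf' := buf ++ [ch]
    if buf'.length = 3 then
      if ["UAA", "UAG", "UGA"].contains (String.ofList buf') then codon
      else codonGoB rest (codon ++ [String.ofList buf']) []
    else codonGoB rest codon buf'

def codon_lists_alt (mRNA : String) : List String :=
  codonGoB mRNA.toList [] []

-- ===== PRECONDITION & SPEC =====
def Spec_codon_lists (mRNA : String) (out : List String) : Prop := out = codon_lists_alt mRNA
instance (mRNA : String) (out : List String) : Decidable (Spec_codon_lists mRNA out) := by unfold Spec_codon_lists; infer_instance

-- ===== CLAIM (what is proved, stated in full; the proofs are below) =====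
def Claim_equal_codon_lists : Prop := ∀ (mRNA : String), Dom_codon_lists mRNA → Spec_codon_lists mRNA (codon_lists mRNA)

-- ===== LEMMAS AND PROOFS =====

-- common reference function: chunk the char list into codons, stop at a stop codon
def chunksSpec : List Char → List String
  | [] => []
  | c :: cs =>
    let h := String.ofList ((c :: cs).take 3)
    if ["UAA", "UAG", "UGA"].contains h then [] else h :: chunksSpec (cs.drop 2)
  termination_by cs => cs.length
  decreasing_by simp

theorem chunksSpec_cons (c : Char) (cs : List Char) :
    chunksSpec (c :: cs)
      = if (["UAA", "UAG", "UGA"] : List String).contains (String.ofList ((c :: cs).take 3))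
        then [] else String.ofList ((c :: cs).take 3) :: chunksSpec ((c :: cs).drop 3) := by
  rw [chunksSpec]
  rfl

-- a string in the stop list has exactly 3 characters
theorem stop_length {l : List Char} (h : (["UAA", "UAG", "UGA"] : List String).contains (String.ofList l) = true) :
    l.length = 3 := by
  simp only [List.contains_eq_mem, List.mem_cons, List.not_mem_nil, or_false,
    decide_eq_true_eq] at h
  rcases h with h | h | h <;>
    · have := congrArg String.toList h
      simp at this
      subst this
      decide

theorem pyRange3_nil (a b : Int) (h : b ≤ a) : PySem.List.pyRange a b 3 = [] := by
  rw [PySem.List.pyRange_of_pos _ _ (by norm_num : (0:Int) < 3)]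
  simp [not_lt.mpr h]

theorem pyRange3_cons (a b : Int) (h : a < b) :
    PySem.List.pyRange a b 3 = a :: PySem.List.pyRange (a + 3) b 3 := by
  rw [PySem.List.pyRange_of_pos _ _ (by norm_num : (0:Int) < 3),
      PySem.List.pyRange_of_pos _ _ (by norm_num : (0:Int) < 3)]
  have hM : ((b - a + 3 - 1) / 3).toNat
      = (if a + 3 < b then ((b - (a + 3) + 3 - 1) / 3).toNat else 0) + 1 := by
    split_ifs <;> omega
  rw [if_pos h, hM, List.range_succ_eq_map, List.map_cons, List.map_map]
  congr 1
  · norm_num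
  · exact List.map_congr_left (fun k _ => by simp [Function.comp]; ring)

-- A's loop from index j computes the chunks of the suffix dropped at j
theorem loopA_eq (mRNA : String) (j : Nat) :
    codonLoopA mRNA (PySem.List.pyRange (j : Int) (PySem.Str.len mRNA) 3)
      = chunksSpec (mRNA.toList.drop j) := by
  have hlen : mRNA.toList.length = mRNA.length := by simp
  have hLen : PySem.Str.len mRNA = (mRNA.length : Int) := by simp
  by_cases hj : mRNA.toList.length ≤ j
  · rw [pyRange3_nil _ _ (by rw [hLen]; omega)]
    rw [List.drop_eq_nil_of_le hj]
    simp [codonLoopA, chunksSpec]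
  · rw [not_le] at hj
    rw [pyRange3_cons _ _ (by rw [hLen]; omega)]
    have hslice : PySem.Str.slice mRNA (some (j : Int)) (some ((j : Int) + 3))
        = String.ofList ((mRNA.toList.drop j).take 3) := by
      apply String.toList_inj.mp
      rw [PySem.Str.toList_slice]
      simp only [PySem.Chars.slice_eq_listSlice]
      have := PySem.List.slice_natCast_add mRNA.toList j 3
      simpa using this
    have hdrop : mRNA.toList.drop (j + 3) = (mRNA.toList.drop j).drop 3 := by
      rw [List.drop_drop]
    obtain ⟨c, cs, hc⟩ : ∃ c cs, mRNA.toList.drop j = c :: cs := by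
      cases h : mRNA.toList.drop j with
      | nil => exact absurd (List.drop_eq_nil_iff.mp h) (by omega)
      | cons c cs => exact ⟨c, cs, rfl⟩
    have ih := loopA_eq mRNA (j + 3)
    rw [show ((j : Int) + 3) = ((j + 3 : Nat) : Int) by push_cast; ring]
    simp only [codonLoopA, hslice]
    rw [hc, chunksSpec_cons, ← hc]
    split_ifs with hstop
    · rfl
    · rw [ih, hdrop]
  termination_by mRNA.toList.length - j
  decreasing_by omega

-- B's streaming loop with a buffer computes the chunks of buffer ++ remaining input
theorem goB_eq : ∀ (cs buf : List Char) (codon : List String), buf.length < 3 →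
    codonGoB cs codon buf = codon ++ chunksSpec (buf ++ cs) := by
  intro cs
  induction cs with
  | nil =>
    intro buf codon hb
    cases buf with
    | nil => simp [codonGoB, chunksSpec]
    | cons x xs =>
      have hns : (["UAA", "UAG", "UGA"] : List String).contains
          (String.ofList ((x :: xs).take 3)) = false := by
        by_contra hcc
        rw [Bool.not_eq_false] at hcc
        have h3 := stop_length hcc
        simp at h3 hb
        omega
      have htake : (x :: xs).take 3 = x :: xs := List.take_of_length_le (by omega)
      have hdrop : (x :: xs).drop 3 = [] := List.drop_eq_nil_of_le (by omega)
      rw [List.append_nil, chunksSpec_cons, hns, htake, hdrop]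
      simp [codonGoB, chunksSpec]
  | cons c rest ih =>
    intro buf codon hb
    simp only [codonGoB]
    by_cases h3 : (buf ++ [c]).length = 3
    · rw [if_pos h3]
      have htake : (buf ++ c :: rest).take 3 = buf ++ [c] := by
        rw [show buf ++ c :: rest = (buf ++ [c]) ++ rest by simp, ← h3,
          List.take_left]
      have hdrop : (buf ++ c :: rest).drop 3 = rest := by
        rw [show buf ++ c :: rest = (buf ++ [c]) ++ rest by simp, ← h3,
          List.drop_left]
      obtain ⟨d, ds, hd⟩ : ∃ d ds, buf ++ c :: rest = d :: ds := by
        cases buf <;> exact ⟨_, _, rfl⟩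
      rw [show chunksSpec (buf ++ c :: rest) = chunksSpec (d :: ds) from by rw [hd],
        chunksSpec_cons, ← hd, htake, hdrop]
      split_ifs with hstop
      · simp
      · rw [ih [] (codon ++ [String.ofList (buf ++ [c])]) (by simp)]
        simp
    · rw [if_neg h3, ih (buf ++ [c]) codon (by simp at h3 ⊢; omega)]
      simp

-- ===== VERDICT (by name: the statement is the Claim_ definition above) =====
theorem codon_lists_spec : Claim_equal_codon_lists := by
  intro mRNA _
  unfold Spec_codon_lists codon_lists codon_lists_alt
  rw [goB_eq mRNA.toList [] [] (by simp), List.nil_append, List.nil_append]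
  have := loopA_eq mRNA 0
  simpa using this
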